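-- pv_equiv track=rewrite | github.com/SSAFYnity/Job-Preparation-Challenge-1st | Programmers/고고학최고의발견/고고학최고의발견_이동우.py | choose_cases
-- ===== SOURCE A (Python) =====
-- def choose_cases(cases, i):
--     if i == len(cases[0]):
--         return cases
--     new_cases = []
--     for case in cases:
--         for _ in range(4):
--             new_cases.append(case[:])
--             case[i] += 1
--     return choose_cases(new_cases, i + 1)
-- ===== SOURCE B (Python) =====
-- def choose_cases(cases, i):
--     n = len(cases[0])
--     k = n - i
--     out = []
--     for case in cases:
--         for code in range(4 ** k):
--             new = case[:]
--             for j in range(k):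
--                 new[i + j] += code // (4 ** (k - 1 - j)) % 4
--             out.append(new)
--     return out
-- ===== Notes on version B (the rewrite author's own statement) =====
-- stated objective: alternative
-- what changed: B replaces A's level-by-level recursive 4-way expansion of the whole case list with a single non-recursive pass that enumerates the 4^(n-i) rotation combinations as base-4 codes and applies each code's digits once to a copy of each input case; B also leaves the caller's lists unmutated (return-value equivalence).
import Mathlib
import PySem

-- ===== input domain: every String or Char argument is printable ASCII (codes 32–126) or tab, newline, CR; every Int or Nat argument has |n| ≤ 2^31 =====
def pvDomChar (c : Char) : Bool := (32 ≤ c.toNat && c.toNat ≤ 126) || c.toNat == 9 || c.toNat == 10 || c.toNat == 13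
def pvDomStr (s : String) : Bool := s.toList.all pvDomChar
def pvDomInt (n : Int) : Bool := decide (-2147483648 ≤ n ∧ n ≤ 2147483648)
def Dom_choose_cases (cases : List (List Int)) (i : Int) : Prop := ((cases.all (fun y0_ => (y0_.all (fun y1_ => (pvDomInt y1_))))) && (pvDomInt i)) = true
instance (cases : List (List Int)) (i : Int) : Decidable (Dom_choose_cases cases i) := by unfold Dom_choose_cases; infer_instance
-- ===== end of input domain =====

-- B enumerates the 4^(n-i) digit combinations by a base-4 code instead of A's level-by-level
-- recursive 4-way expansion of the whole case list; A mutates each caller list in place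
-- (column i gains +4, with Python's negative-index wraparound) while B does not:
-- the equivalence proved here is about the RETURN value only.

-- shared primitive: Python's `xs[i] += v` (negative in-range indices wrap; Pre_ keeps them in range)
def pvAdd (c : List Int) (i v : Int) : List Int :=
  PySem.List.pySetD c i (PySem.List.pyGetD c i 0 + v)

-- ===== PORT A =====
-- one recursion level: new_cases = []; for case in cases: for _ in range(4): new_cases.append(case[:]); case[i] += 1
def chooseExpand (cases : List (List Int)) (i : Int) : List (List Int) :=
  cases.foldl (fun acc case_ =>
    ((PySem.List.pyRange 0 4 1).foldl
      (fun (st : List (List Int) × List Int) _ => (st.1 ++ [st.2], pvAdd st.2 i 1))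
      (acc, case_)).1) []

-- A's recursion, with fuel (n - i).toNat: exactly the number of levels Python's recursion performs
-- on inputs where it terminates (the fuel-0 branch is unreachable under Pre_)
def chooseGo : Nat → List (List Int) → Int → List (List Int)
  | fuel, cases, i =>
    if i = ((cases.headD []).length : Int) then cases
    else match fuel with
      | 0 => cases
      | f + 1 => chooseGo f (chooseExpand cases i) (i + 1)

def choose_cases (cases : List (List Int)) (i : Int) : List (List Int) :=
  chooseGo ((((cases.headD []).length : Int) - i).toNat) cases i

-- ===== PORT B =====
-- B's inner loop: new = case[:]; for j in range(k): new[i + j] += code // (4 ** (k - 1 - j)) % 4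
-- (Python's `4 ** e` here always has e ≥ 0 when this loop runs, so `.toNat` on the exponent is exact)
def applyCode (case_ : List Int) (i k code : Int) : List Int :=
  (PySem.List.pyRange 0 k 1).foldl
    (fun new j => pvAdd new (i + j)
      (PySem.Int.mod (PySem.Int.floordiv code ((4 : Int) ^ (k - 1 - j).toNat)) 4)) case_

-- `range(4 ** k)`: for k < 0 Python's `4 ** k` is a float and `range` raises TypeError, which is
-- outside Pre_; on k ≥ 0 the ported bound (4 : Int) ^ k.toNat is exact
def choose_cases_alt (cases : List (List Int)) (i : Int) : List (List Int) :=
  let n : Int := ((cases.headD []).length : Int)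
  let k : Int := n - i
  cases.foldl (fun out case_ =>
    out ++ (PySem.List.pyRange 0 ((4 : Int) ^ k.toNat) 1).map
      (fun code => applyCode case_ i k code)) []

-- ===== PRECONDITION & SPEC =====
-- Exactly where the Python A returns: cases nonempty (cases[0] raises IndexError on []),
-- i ≤ n = len(cases[0]) (for i > n the recursion never reaches its base case),
-- -n ≤ i (for i < -n even cases[0][i] raises IndexError), and unless i = n every case must be
-- long enough (≥ n) for all the indexings case[j], i ≤ j < n, performed across the levels.
def Pre_choose_cases (cases : List (List Int)) (i : Int) : Prop :=
  cases ≠ [] ∧ -((cases.headD []).length : Int) ≤ i ∧ i ≤ ((cases.headD []).length : Int) ∧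
    (i = ((cases.headD []).length : Int) ∨ ∀ c ∈ cases, (cases.headD []).length ≤ c.length)
instance (cases : List (List Int)) (i : Int) : Decidable (Pre_choose_cases cases i) := by
  unfold Pre_choose_cases; infer_instance

def pvWitness_choose_cases : List (List Int) × Int := ([[0, 0]], 0)

def Spec_choose_cases (cases : List (List Int)) (i : Int) (out : List (List Int)) : Prop := out = choose_cases_alt cases i
instance (cases : List (List Int)) (i : Int) (out : List (List Int)) : Decidable (Spec_choose_cases cases i out) := by unfold Spec_choose_cases; infer_instance

-- ===== CLAIM (what is proved, stated in full; the proofs are below) =====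
def Claim_equal_choose_cases : Prop := ∀ (cases : List (List Int)) (i : Int), Dom_choose_cases cases i → Pre_choose_cases cases i → Spec_choose_cases cases i (choose_cases cases i)

-- ===== LEMMAS AND PROOFS =====

lemma pyIdx?_lt_of_some {n : Nat} {i : Int} {k : Nat} (h : PySem.List.pyIdx? n i = some k) : k < n := by
  simp only [PySem.List.pyIdx?] at h
  split_ifs at h <;> simp_all <;> omega

lemma length_pvAdd (c : List Int) (i v : Int) : (pvAdd c i v).length = c.length := by
  simp only [pvAdd, PySem.List.pySetD, PySem.List.pySet?]
  cases h : PySem.List.pyIdx? c.length i <;> simp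

lemma pvAdd_of_some {c : List Int} {i : Int} {k : Nat} (h : PySem.List.pyIdx? c.length i = some k) (v : Int) :
    pvAdd c i v = c.set k ((c.getD k 0) + v) := by
  have hk := pyIdx?_lt_of_some h
  simp [pvAdd, PySem.List.pySetD, PySem.List.pySet?, PySem.List.pyGetD, PySem.List.pyGet?, h,
    List.getElem?_eq_getElem hk]

lemma pvAdd_of_none {c : List Int} {i : Int} (h : PySem.List.pyIdx? c.length i = none) (v : Int) :
    pvAdd c i v = c := by
  simp [pvAdd, PySem.List.pySetD, PySem.List.pySet?, h]

lemma pvAdd_zero (c : List Int) (i : Int) : pvAdd c i 0 = c := by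
  cases h : PySem.List.pyIdx? c.length i with
  | none => exact pvAdd_of_none h 0
  | some k =>
    have hk := pyIdx?_lt_of_some h
    rw [pvAdd_of_some h, add_zero, List.getD_eq_getElem _ _ hk, List.set_getElem_self]

lemma pvAdd_pvAdd (c : List Int) (i a b : Int) : pvAdd (pvAdd c i a) i b = pvAdd c i (a + b) := by
  cases h : PySem.List.pyIdx? c.length i with
  | none => rw [pvAdd_of_none h, pvAdd_of_none h, pvAdd_of_none h]
  | some k =>
    have hk := pyIdx?_lt_of_some h
    have h2 : PySem.List.pyIdx? (pvAdd c i a).length i = some k := by rw [length_pvAdd]; exact h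
    have hx : ∀ x : Int, (c.set k x).getD k 0 = x := by
      intro x
      rw [List.getD_eq_getElem _ _ (by simpa using hk), List.getElem_set_self]
    rw [pvAdd_of_some h2 b, pvAdd_of_some h a, pvAdd_of_some h (a + b), hx, List.set_set]
    ring_nf

-- the literal range(4)
lemma pyRange04 : PySem.List.pyRange 0 4 1 = [0, 1, 2, 3] := by decide

-- A's expansion of one level, as a flatMap
lemma chooseExpand_eq (cases : List (List Int)) (i : Int) :
    chooseExpand cases i =
      cases.flatMap (fun c => [c, pvAdd c i 1, pvAdd c i 2, pvAdd c i 3]) := by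
  unfold chooseExpand
  rw [pyRange04]
  have step : ∀ (acc : List (List Int)) (c : List Int),
      (([0, 1, 2, 3] : List Int).foldl
        (fun (st : List (List Int) × List Int) _ => (st.1 ++ [st.2], pvAdd st.2 i 1)) (acc, c)).1
        = acc ++ [c, pvAdd c i 1, pvAdd c i 2, pvAdd c i 3] := by
    intro acc c
    simp only [List.foldl_cons, List.foldl_nil]
    rw [pvAdd_pvAdd, pvAdd_pvAdd]
    norm_num [List.append_assoc]
  induction cases using List.reverseRecOn with
  | nil => simp
  | append_singleton cs c ih =>
    rw [List.foldl_append, ih, List.foldl_cons, List.foldl_nil, step, List.flatMap_append]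
    simp

-- B's combination space, structured as A builds it: combE appends one more digit (the next,
-- less significant column) to every combination
def combE (cs : List (List Int)) : List (List Int) :=
  cs.flatMap (fun c => (PySem.List.pyRange 0 4 1).map (fun d => c ++ [d]))

def comb (k : Nat) : List (List Int) := combE^[k] [[]]

-- applying a digit list to a case, column i onward (proof-side bridge between the two ports)
def altApply (case_ : List Int) (i : Int) (combo : List Int) : List Int :=
  (combo.foldl (fun (st : List Int × Int) d => (pvAdd st.1 (i + st.2) d, st.2 + 1)) (case_, 0)).1

lemma combE_cons_comm (L : List (List Int)) :
    combE (([0, 1, 2, 3] : List Int).flatMap (fun d => L.map (fun c => d :: c)))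
      = ([0, 1, 2, 3] : List Int).flatMap (fun d => (combE L).map (fun c => d :: c)) := by
  simp [combE, List.map_flatMap, List.flatMap_map, Function.comp_def]

lemma comb_succ_cons : ∀ (k : Nat),
    comb (k + 1) = ([0, 1, 2, 3] : List Int).flatMap (fun d => (comb k).map (fun c => d :: c)) := by
  intro k
  induction k with
  | zero => simp [comb, combE, pyRange04]
  | succ k ih =>
    have h1 : comb (k + 1 + 1) = combE (comb (k + 1)) := by
      simp [comb, Function.iterate_succ_apply']
    have h2 : comb (k + 1) = combE (comb k) := by
      simp [comb, Function.iterate_succ_apply']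
    rw [h1]
    conv_lhs => rw [ih]
    rw [combE_cons_comm, ← h2]

-- shifting the column counter of altApply
lemma altApply_shift : ∀ (combo : List Int) (c : List Int) (i j : Int),
    (combo.foldl (fun (st : List Int × Int) d => (pvAdd st.1 (i + st.2) d, st.2 + 1)) (c, j + 1)).1
      = (combo.foldl (fun (st : List Int × Int) d => (pvAdd st.1 ((i + 1) + st.2) d, st.2 + 1)) (c, j)).1 := by
  intro combo
  induction combo with
  | nil => intro c i j; rfl
  | cons d rest ih =>
    intro c i j
    simp only [List.foldl_cons]
    have : i + (j + 1) = (i + 1) + j := by ring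
    rw [this, ih]

lemma altApply_cons (c : List Int) (i d : Int) (combo : List Int) :
    altApply c i (d :: combo) = altApply (pvAdd c i d) (i + 1) combo := by
  unfold altApply
  simp only [List.foldl_cons, add_zero, zero_add]
  exact altApply_shift combo (pvAdd c i d) i 0

lemma altApply_nil (c : List Int) (i : Int) : altApply c i [] = c := rfl

-- the main invariant: k remaining levels of A's recursion = one application pass with comb k
lemma go_eq : ∀ (k : Nat) (cases : List (List Int)) (i : Int), cases ≠ [] →
    ((cases.headD []).length : Int) = i + k →
    chooseGo k cases i = cases.flatMap (fun c => (comb k).map (fun combo => altApply c i combo)) := by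
  intro k
  induction k with
  | zero =>
    intro cases i hne hlen
    unfold chooseGo
    rw [if_pos (by omega)]
    simp [comb, altApply_nil]
  | succ k ih =>
    intro cases i hne hlen
    unfold chooseGo
    rw [if_neg (by omega)]
    show chooseGo k (chooseExpand cases i) (i + 1) = _
    have hexp := chooseExpand_eq cases i
    have hne' : chooseExpand cases i ≠ [] := by
      rw [hexp]
      cases cases with
      | nil => exact absurd rfl hne
      | cons c cs => simp
    have hhead : ((chooseExpand cases i).headD []).length = (cases.headD []).length := by
      rw [hexp]
      cases cases with
      | nil => rfl
      | cons c cs => simp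
    rw [ih (chooseExpand cases i) (i + 1) hne' (by rw [hhead]; push_cast at hlen ⊢; omega)]
    rw [hexp, List.flatMap_assoc]
    apply List.flatMap_congr
    intro c _
    have h4 : ([c, pvAdd c i 1, pvAdd c i 2, pvAdd c i 3] : List (List Int))
        = ([0, 1, 2, 3] : List Int).map (fun d => pvAdd c i d) := by
      simp [pvAdd_zero]
    rw [h4, List.flatMap_map, comb_succ_cons]
    rw [List.map_flatMap]
    apply List.flatMap_congr
    intro d _
    rw [List.map_map]
    apply List.map_congr_left
    intro combo _
    simp [Function.comp, altApply_cons]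

-- base-4 digit arithmetic: the leading digit and the lower digits of d * M + r
lemma digit_top (M d r : Int) (hM : 0 < M) (hd0 : 0 ≤ d) (hd4 : d < 4)
    (hr0 : 0 ≤ r) (hrM : r < M) :
    PySem.Int.mod (PySem.Int.floordiv (d * M + r) M) 4 = d := by
  rw [PySem.Int.floordiv_eq_ediv_of_pos hM, PySem.Int.mod_eq_emod_of_pos (by norm_num)]
  rw [show d * M + r = r + d * M from by ring, Int.add_mul_ediv_right _ _ (by omega),
    Int.ediv_eq_zero_of_lt hr0 hrM, zero_add, Int.emod_eq_of_lt hd0 hd4]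

lemma digit_high (P u d r : Int) (hP : 0 < P) :
    PySem.Int.mod (PySem.Int.floordiv (d * (4 * P * u) + r) P) 4
      = PySem.Int.mod (PySem.Int.floordiv r P) 4 := by
  rw [PySem.Int.floordiv_eq_ediv_of_pos hP, PySem.Int.floordiv_eq_ediv_of_pos hP,
    PySem.Int.mod_eq_emod_of_pos (by norm_num), PySem.Int.mod_eq_emod_of_pos (by norm_num)]
  rw [show d * (4 * P * u) + r = r + (d * u * 4) * P from by ring,
    Int.add_mul_ediv_right _ _ (by omega),
    show r / P + d * u * 4 = r / P + 4 * (d * u) from by ring,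
    Int.add_mul_emod_self_left]

-- a shifted range is a mapped range
lemma pyRange_seg (a b M : Int) (hab : b = a + M) :
    PySem.List.pyRange a b 1 = (PySem.List.pyRange 0 M 1).map (fun r => a + r) := by
  subst hab
  rw [PySem.List.pyRange_one, PySem.List.pyRange_one]
  simp [List.map_map]

-- range(4*M) split into its four base-4 blocks
lemma pyRange_four_blocks (M : Int) (hM : 0 < M) :
    PySem.List.pyRange 0 (4 * M) 1
      = ([0, 1, 2, 3] : List Int).flatMap
          (fun d => (PySem.List.pyRange 0 M 1).map (fun r => d * M + r)) := by
  rw [PySem.List.pyRange_one_append 0 M (4 * M) (by omega) (by omega),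
    PySem.List.pyRange_one_append M (2 * M) (4 * M) (by omega) (by omega),
    PySem.List.pyRange_one_append (2 * M) (3 * M) (4 * M) (by omega) (by omega),
    pyRange_seg M (2 * M) M (by ring), pyRange_seg (2 * M) (3 * M) M (by ring),
    pyRange_seg (3 * M) (4 * M) M (by ring)]
  simp only [List.flatMap_cons, List.flatMap_nil, List.append_nil]
  rw [show (fun r => (0 : Int) * M + r) = (fun r : Int => 0 + r) from by funext r; ring,
    show (fun r => (1 : Int) * M + r) = (fun r : Int => M + r) from by funext r; ring]
  simp

-- peeling the most significant digit off applyCode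
lemma applyCode_succ (m : Nat) (i d r : Int) (c : List Int) (hd0 : 0 ≤ d) (hd4 : d < 4)
    (hr0 : 0 ≤ r) (hrM : r < (4 : Int) ^ m) :
    applyCode c i ((m : Int) + 1) (d * (4 : Int) ^ m + r)
      = applyCode (pvAdd c i d) (i + 1) (m : Int) r := by
  unfold applyCode
  rw [PySem.List.pyRange_one_cons (by omega)]
  rw [List.foldl_cons]
  have e0 : ((m : Int) + 1 - 1 - 0).toNat = m := by omega
  rw [e0, add_zero, digit_top ((4 : Int) ^ m) d r (by positivity) hd0 hd4 hr0 hrM]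
  rw [show (0 : Int) + 1 = 1 from by ring, pyRange_seg 1 ((m : Int) + 1) (m : Int) (by ring),
    List.foldl_map]
  apply PySem.List.foldl_congr_mem
  intro acc t ht
  have htm := PySem.List.mem_pyRange_one.1 ht
  have hsplit : ((m : Int) + 1 - 1 - (1 + t)).toNat = ((m : Int) - 1 - t).toNat := by omega
  have hidx : i + (1 + t) = (i + 1) + t := by ring
  have hexp : m = ((m : Int) - 1 - t).toNat + t.toNat + 1 := by omega
  have hm4 : (4 : Int) ^ m
      = 4 * (4 : Int) ^ (((m : Int) - 1 - t).toNat) * (4 : Int) ^ t.toNat := by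
    conv_lhs => rw [hexp]
    rw [pow_add, pow_add, pow_one]
    ring
  rw [hsplit, hidx, hm4,
    digit_high ((4 : Int) ^ (((m : Int) - 1 - t).toNat)) ((4 : Int) ^ t.toNat) d r (by positivity)]

-- codes 0 .. 4^m - 1 enumerate exactly the digit lists of comb m, in order
lemma codes_eq : ∀ (m : Nat) (i : Int) (c : List Int),
    (PySem.List.pyRange 0 ((4 : Int) ^ m) 1).map (fun code => applyCode c i (m : Int) code)
      = (comb m).map (fun combo => altApply c i combo) := by
  intro m
  induction m with
  | zero =>
    intro i c
    simp [comb, applyCode, altApply_nil]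
  | succ m ih =>
    intro i c
    have hM : (0 : Int) < 4 ^ m := by positivity
    rw [show ((4 : Int) ^ (m + 1)) = 4 * 4 ^ m from by rw [pow_succ]; ring]
    rw [pyRange_four_blocks _ hM, List.map_flatMap, comb_succ_cons, List.map_flatMap]
    apply List.flatMap_congr
    intro d hd
    rw [List.map_map, List.map_map]
    have hd04 : 0 ≤ d ∧ d < 4 := by fin_cases hd <;> norm_num
    have hstep : (PySem.List.pyRange 0 ((4 : Int) ^ m) 1).map
          (fun r => applyCode c i ((m : Nat) + 1 : Nat) (d * (4 : Int) ^ m + r))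
        = (PySem.List.pyRange 0 ((4 : Int) ^ m) 1).map
          (fun r => applyCode (pvAdd c i d) (i + 1) (m : Int) r) := by
      apply List.map_congr_left
      intro r hr
      have hrb := PySem.List.mem_pyRange_one.1 hr
      have hcast : (((m : Nat) + 1 : Nat) : Int) = (m : Int) + 1 := by push_cast; ring
      rw [hcast]
      exact applyCode_succ m i d r c hd04.1 hd04.2 hrb.1 hrb.2
    rw [show ((fun code => applyCode c i (((m + 1 : Nat) : Int)) code) ∘ fun r => d * 4 ^ m + r)
          = fun r => applyCode c i ((m : Nat) + 1 : Nat) (d * (4 : Int) ^ m + r) from rfl]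
    rw [hstep, ih (i + 1) (pvAdd c i d)]
    apply List.map_congr_left
    intro combo _
    simp [Function.comp, altApply_cons]

-- B's port, rewritten as a flatMap over cases
lemma alt_eq (cases : List (List Int)) (i : Int) :
    choose_cases_alt cases i
      = cases.flatMap (fun c =>
          (PySem.List.pyRange 0 ((4 : Int) ^ (((cases.headD []).length : Int) - i).toNat) 1).map
            (fun code => applyCode c i (((cases.headD []).length : Int) - i) code)) := by
  show cases.foldl (fun out case_ =>
      out ++ (PySem.List.pyRange 0 ((4 : Int) ^ ((((cases.headD []).length : Int)) - i).toNat) 1).map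
        (fun code => applyCode case_ i ((((cases.headD []).length : Int)) - i) code)) [] = _
  rw [PySem.List.foldl_append_eq_flatMap]
  rfl

-- ===== VERDICT (by name: the statement is the Claim_ definition above) =====
theorem choose_cases_spec : Claim_equal_choose_cases := by
  intro cases i _ hpre
  obtain ⟨hne, _, hle, _⟩ := hpre
  unfold Spec_choose_cases
  unfold choose_cases
  rw [go_eq ((((cases.headD []).length : Int) - i).toNat) cases i hne (by omega), alt_eq]
  apply List.flatMap_congr
  intro c _
  have hcast : (((((cases.headD []).length : Int) - i).toNat : Nat) : Int)
      = ((cases.headD []).length : Int) - i := by omega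
  rw [← codes_eq ((((cases.headD []).length : Int) - i).toNat) i c, hcast]
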